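-- pv_equiv track=rewrite | github.com/NavidNaf/CTF-Solve-with-Codes | misc-ctf-comps/2025-patriotctf/matrix-reconstruction.py | build_system
-- ===== SOURCE A (Python) =====
-- def build_system(states):
--     """
--     Build linear system Ax = b over GF(2) for unknowns:
--     - A 32x32 matrix bits in row-major order (indices 0..1023)
--     - B 32-bit vector bits (indices 1024..1055)
--     Returns list of integer rows each packing coefficients and rhs bit
--     as a (n_vars+1)-bit integer.
--     """
--     n_vars = 32 * 32 + 32
--     rows = []
--     for s, sn in zip(states, states[1:]):
--         for j in range(32):
--             row = 0
--             # coefficients for A row j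
--             for k in range(32):
--                 if (s >> k) & 1:
--                     row |= 1 << (j * 32 + k)
--             # coefficient for B_j
--             row |= 1 << (1024 + j)
--             # rhs bit
--             rhs = (sn >> j) & 1
--             row |= rhs << n_vars
--             rows.append(row)
--     return rows, n_vars
-- ===== SOURCE B (Python) =====
-- def build_system(states):
--     """Single pass with running accumulators: walks the state list keeping the
--     previous state, and for each pair emits the 32 rows by maintaining three
--     running values (coef, bsel, t) -- the coefficient block shifted 32 bits per
--     step, the B-selector bit shifted 1 per step, and the next state halved per
--     step -- added together (the three parts occupy disjoint bit ranges:
--     coef < 2**1024, bsel a single bit in [2**1024, 2**1056), rhs bit at 2**1056),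
--     instead of indexed per-(j,k) bit tests and ORs."""
--     n_vars = 32 * 32 + 32
--     TOP = 1 << n_vars
--     rows = []
--     prev = None
--     for s in states:
--         if prev is not None:
--             coef = prev & 0xFFFFFFFF
--             bsel = 1 << 1024
--             t = s
--             for _ in range(32):
--                 rows.append(coef + bsel + (t % 2) * TOP)
--                 coef <<= 32
--                 bsel <<= 1
--                 t //= 2
--         prev = s
--     return rows, n_vars
-- ===== Notes on version B (the rewrite author's own statement) =====
-- stated objective: faster
-- what changed: One pass tracking the previous state (no zip of two list traversals) that emits each pair's 32 rows from three running accumulators -- coefficient block shifted 32 bits/step, B-selector bit shifted 1/step, next state halved/step -- combined by addition of disjoint bit ranges, replacing A's indexed per-(j,k) bit tests and ORs.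
import Mathlib
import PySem

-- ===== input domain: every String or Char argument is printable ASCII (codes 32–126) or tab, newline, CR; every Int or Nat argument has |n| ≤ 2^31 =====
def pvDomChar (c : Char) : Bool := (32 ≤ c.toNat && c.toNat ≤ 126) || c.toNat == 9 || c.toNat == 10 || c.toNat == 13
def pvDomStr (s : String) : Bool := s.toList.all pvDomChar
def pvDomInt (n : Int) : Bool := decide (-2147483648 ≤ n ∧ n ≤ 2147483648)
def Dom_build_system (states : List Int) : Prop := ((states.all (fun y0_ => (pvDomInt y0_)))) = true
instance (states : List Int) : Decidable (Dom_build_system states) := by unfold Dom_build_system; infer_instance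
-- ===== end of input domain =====

-- B walks the state list once keeping the previous state and emits each pair's 32 rows from three running
-- accumulators (coefficient block, B-selector bit, halved next state) combined by addition of disjoint bit
-- ranges, instead of A's indexed per-(j,k) bit tests and ORs (objective: faster, constant factor).

-- ===== PORT A =====
def build_system (states : List Int) : List Int × Int :=
  let n_vars : Nat := 32 * 32 + 32
  let rows : List Int :=
    (states.zip (states.drop 1)).foldl (fun rows (p : Int × Int) =>
      (List.range 32).foldl (fun rows (j : Nat) =>
        let row : Int :=
          (List.range 32).foldl (fun row (k : Nat) =>
            if PySem.Int.band (p.1 >>> k) 1 ≠ 0 then PySem.Int.bor row ((1 : Int) <<< (j * 32 + k)) else row) 0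
        let row := PySem.Int.bor row ((1 : Int) <<< (1024 + j))
        let rhs := PySem.Int.band (p.2 >>> j) 1
        let row := PySem.Int.bor row (rhs <<< n_vars)
        rows ++ [row]) rows) []
  (rows, (n_vars : Int))

-- ===== PORT B =====
-- inner loop body of Source B: append the row built from the running accumulators, then update them
def pvInnerB (TOP : Int) (q : List Int × Int × Int × Int) (_ : Nat) : List Int × Int × Int × Int :=
  (q.1 ++ [q.2.1 + q.2.2.1 + PySem.Int.mod q.2.2.2 2 * TOP],
   q.2.1 <<< (32 : Nat), q.2.2.1 <<< (1 : Nat), PySem.Int.floordiv q.2.2.2 2)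

-- outer loop body of Source B: track the previous state; on a pair, run 32 accumulator steps
def pvOuterB (TOP : Int) (st : List Int × Option Int) (s : Int) : List Int × Option Int :=
  match st.2 with
  | none => (st.1, some s)
  | some prev =>
    (((List.range 32).foldl (pvInnerB TOP)
        (st.1, PySem.Int.band prev 0xFFFFFFFF, (1 : Int) <<< (1024 : Nat), s)).1, some s)

def build_system_alt (states : List Int) : List Int × Int :=
  let n_vars : Nat := 32 * 32 + 32
  let TOP : Int := (1 : Int) <<< n_vars
  ((states.foldl (pvOuterB TOP) ([], none)).1, (n_vars : Int))

-- ===== PRECONDITION & SPEC =====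
def Spec_build_system (states : List Int) (out : List Int × Int) : Prop := out = build_system_alt states
instance (states : List Int) (out : List Int × Int) : Decidable (Spec_build_system states out) := by unfold Spec_build_system; infer_instance

-- ===== CLAIM (what is proved, stated in full; the proofs are below) =====
def Claim_equal_build_system : Prop := ∀ (states : List Int), Dom_build_system states → Spec_build_system states (build_system states)

-- ===== LEMMAS AND PROOFS =====

-- the closed form of one emitted row (pair p, row index j); both ports' rows are reduced to it
def pvRow (p : Int × Int) (j : Nat) : Int :=
  (PySem.Int.band p.1 4294967295) <<< (32 * j) + ((1 : Int) <<< (1024 : Nat)) <<< j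
    + PySem.Int.mod (p.2 >>> j) 2 * ((1 : Int) <<< (1056 : Nat))

-- x & 1 is x mod 2 (Python's %, positive divisor = Lean's emod)
theorem pv_band_one (x : Int) : PySem.Int.band x 1 = x % 2 := by
  rw [PySem.Int.band_one, PySem.Int.mod_eq_emod_of_pos (by norm_num)]

-- x & 0xFFFFFFFF is x mod 2^32 (Python semantics, any sign)
theorem pv_band_mask (x : Int) : PySem.Int.band x 4294967295 = x % 4294967296 := by
  have hmask : ∀ y : Nat, y &&& 4294967295 = y % 4294967296 := by
    intro y
    have := Nat.and_two_pow_sub_one_eq_mod y 32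
    norm_num at this
    exact this
  unfold PySem.Int.band
  have hM : Int.toNat 4294967295 = 4294967295 := rfl
  split_ifs with ha hb hb <;> try omega
  · rw [hM, hmask]; omega
  · rw [hM, Nat.and_comm, hmask]; omega

-- bit k of x (k < 32) equals bit k of (x mod 2^32)
theorem pv_bit_mod (x : Int) (k : Nat) (hk : k < 32) :
    (x % 4294967296) / (2 ^ k : Int) % 2 = x / (2 ^ k : Int) % 2 := by
  have hsplit : (2 ^ k : Int) * 2 ^ (31 - k) * 2 = 4294967296 := by
    have h : (2 ^ k : Int) * 2 ^ (31 - k) * 2 = 2 ^ (k + (31 - k) + 1) := by ring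
    rw [h]
    norm_num [show k + (31 - k) + 1 = 32 by omega]
  set q := x / 4294967296 with hqdef
  have hq : x % 4294967296 = x + -q * 4294967296 := by
    have := Int.emod_def x 4294967296
    omega
  rw [hq]
  have h2 : x + -q * 4294967296 = x + (-q * (2 ^ (31 - k) * 2)) * 2 ^ k := by
    rw [← hsplit]; ring
  rw [h2, Int.add_mul_ediv_right _ _ (by positivity : (2:Int) ^ k ≠ 0)]
  have h3 : x / 2 ^ k + -q * (2 ^ (31 - k) * 2) = x / 2 ^ k + 2 * (-q * 2 ^ (31 - k)) := by ring
  rw [h3, Int.add_mul_emod_self_left]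

-- the inner bit-copy loop of A places (s mod 2^32) at offset off
theorem pv_inner_loop (s : Int) (off : Nat) :
    (List.range 32).foldl (fun row (k : Nat) =>
        if PySem.Int.band (s >>> k) 1 ≠ 0 then PySem.Int.bor row ((1 : Int) <<< (off + k)) else row) (0 : Int)
      = (PySem.Int.band s 4294967295) <<< off := by
  set m : Nat := (s % 4294967296).toNat with hmdef
  have hm32 : m < 4294967296 := by omega
  have hmx : (m : Int) = s % 4294967296 := by omega
  have hsh : ∀ (a t : Nat), ((a : Int)) <<< t = (((a <<< t : Nat)) : Int) := by
    intro a t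
    simp only [Nat.shiftLeft_eq, Int.shiftLeft_eq]
    push_cast; ring
  have hbit : ∀ (k : Nat), k < 32 → ((PySem.Int.band (s >>> k) 1 ≠ 0) ↔ m / 2 ^ k % 2 = 1) := by
    intro k hk
    rw [pv_band_one, Int.shiftRight_eq_div_pow]
    have hcast : ((2 ^ k : Nat) : Int) = (2 ^ k : Int) := by push_cast; ring
    rw [hcast]
    have h1 := pv_bit_mod s k hk
    rw [← hmx] at h1
    have h2 : ((m : Int)) / (2 ^ k : Int) = ((m / 2 ^ k : Nat) : Int) := by
      rw [← hcast]
      exact_mod_cast (Int.natCast_ediv m (2 ^ k)).symm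
    rw [h2] at h1
    have h3 : ((m / 2 ^ k : Nat) : Int) % 2 = ((m / 2 ^ k % 2 : Nat) : Int) := by
      exact_mod_cast (Int.natCast_emod (m / 2 ^ k) 2).symm
    rw [h3] at h1
    omega
  have main : ∀ n, n ≤ 32 →
      (List.range n).foldl (fun row (k : Nat) =>
        if PySem.Int.band (s >>> k) 1 ≠ 0 then PySem.Int.bor row ((1 : Int) <<< (off + k)) else row) (0 : Int)
      = (((m % 2 ^ n) : Nat) : Int) <<< off := by
    intro n hn
    induction n with
    | zero => simp [Int.shiftLeft_eq]
    | succ n ih =>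
      have hn' : n ≤ 32 := by omega
      rw [List.range_succ, List.foldl_append, ih hn', List.foldl_cons, List.foldl_nil]
      have hmod : m % 2 ^ (n + 1) = m % 2 ^ n + 2 ^ n * (m / 2 ^ n % 2) := by
        rw [pow_succ, Nat.mod_mul]
      by_cases hb : PySem.Int.band (s >>> n) 1 ≠ 0
      · rw [if_pos hb]
        have hbn : m / 2 ^ n % 2 = 1 := (hbit n (by omega)).mp hb
        have hone : (1 : Int) <<< (off + n) = (((1 <<< (off + n) : Nat)) : Int) := by
          simp only [Nat.shiftLeft_eq, Int.shiftLeft_eq]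
          push_cast; ring
        rw [hsh, hone, PySem.Int.bor_natCast]
        have hor : ((m % 2 ^ n) <<< off) ||| (1 <<< (off + n)) = (m % 2 ^ (n + 1)) <<< off := by
          have hlt : (m % 2 ^ n) <<< off < 2 ^ (off + n) := by
            rw [Nat.shiftLeft_eq, pow_add]
            have hlt2 : m % 2 ^ n < 2 ^ n := Nat.mod_lt _ (by positivity)
            calc m % 2 ^ n * 2 ^ off < 2 ^ n * 2 ^ off :=
                  (Nat.mul_lt_mul_right (Nat.two_pow_pos off)).mpr hlt2
              _ = 2 ^ off * 2 ^ n := by ring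
          have hadd := Nat.two_pow_add_eq_or_of_lt hlt 1
          rw [Nat.mul_one] at hadd
          have hone' : (1 : Nat) <<< (off + n) = 2 ^ (off + n) := by simp [Nat.shiftLeft_eq]
          rw [Nat.lor_comm, hone', ← hadd, hmod, hbn]
          rw [Nat.shiftLeft_eq, Nat.shiftLeft_eq, pow_add]
          ring
        rw [hor, ← hsh]
      · rw [if_neg hb]
        have h4 : ¬ (m / 2 ^ n % 2 = 1) := fun h => hb ((hbit n (by omega)).mpr h)
        have hbn : m / 2 ^ n % 2 = 0 := by omega
        rw [hmod, hbn, Nat.mul_zero, Nat.add_zero]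
  have h32 := main 32 (le_refl 32)
  rw [h32, pv_band_mask s]
  have hmm : m % 2 ^ 32 = m := Nat.mod_eq_of_lt (by norm_num; omega)
  rw [hmm, hmx]

-- foldl appending singletons is map
theorem pv_foldl_append_map {α β : Type} (f : α → β) (l : List α) (acc : List β) :
    l.foldl (fun acc x => acc ++ [f x]) acc = acc ++ l.map f := by
  induction l generalizing acc with
  | nil => simp
  | cons x xs ih => simp [ih]

-- A's three ORs of disjoint bit ranges are B's sum (j < 32)
theorem pv_row_eq (prev s : Int) (j : Nat) (hj : j < 32) :
    PySem.Int.bor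
      (PySem.Int.bor ((PySem.Int.band prev 4294967295) <<< (j * 32)) ((1 : Int) <<< (1024 + j)))
      ((PySem.Int.band (s >>> j) 1) <<< (1056 : Nat))
    = pvRow (prev, s) j := by
  have hsh : ∀ (a t : Nat), ((a : Int)) <<< t = (((a <<< t : Nat)) : Int) := by
    intro a t
    simp only [Nat.shiftLeft_eq, Int.shiftLeft_eq]
    push_cast; ring
  set m : Nat := (prev % 4294967296).toNat with hmdef
  have hm32 : m < 4294967296 := by omega
  have hm : PySem.Int.band prev 4294967295 = (m : Int) := by rw [pv_band_mask]; omega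
  set b : Nat := ((s >>> j) % 2).toNat with hbdef
  have hb1 : b ≤ 1 := by
    have := Int.emod_nonneg (s >>> j) (by norm_num : (2:Int) ≠ 0)
    have := Int.emod_lt_of_pos (s >>> j) (by norm_num : (0:Int) < 2)
    omega
  have hbnd : PySem.Int.band (s >>> j) 1 = (b : Int) := by
    rw [pv_band_one]; omega
  have hmod : PySem.Int.mod (s >>> j) 2 = (b : Int) := by
    rw [PySem.Int.mod_eq_emod_of_pos (by norm_num)]; omega
  unfold pvRow
  rw [hm, hbnd, hmod]
  have hone : ∀ t : Nat, (1 : Int) <<< t = (((1 <<< t : Nat)) : Int) := by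
    intro t
    simp only [Nat.shiftLeft_eq, Int.shiftLeft_eq]
    push_cast; ring
  rw [hsh m (j*32), hsh m (32*j), hone (1024+j), hone (1024 : Nat), hone (1056 : Nat), hsh b 1056]
  rw [hsh ((1 <<< 1024 : Nat)) j]
  rw [PySem.Int.bor_natCast, PySem.Int.bor_natCast]
  have hbm : ((b : Int)) * ((1 <<< 1056 : Nat) : Int) = ((b * (1 <<< 1056) : Nat) : Int) := by
    push_cast; ring
  rw [hbm]
  have : (m <<< (j*32)) ||| (1 <<< (1024+j)) ||| (b <<< 1056)
       = m <<< (32*j) + (1 <<< 1024) <<< j + b * (1 <<< 1056) := by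
    simp only [Nat.shiftLeft_eq, one_mul]
    have hp1 : m * 2 ^ (j*32) < 2 ^ (1024 + j) := by
      calc m * 2 ^ (j*32) < 4294967296 * 2 ^ (j*32) :=
            (Nat.mul_lt_mul_right (Nat.two_pow_pos _)).mpr hm32
        _ = 2 ^ (32 + j*32) := by rw [pow_add]; norm_num
        _ ≤ 2 ^ (1024 + j) := Nat.pow_le_pow_right (by norm_num) (by omega)
    have h1 := Nat.two_pow_add_eq_or_of_lt hp1 1
    rw [Nat.mul_one] at h1
    have hp2 : m * 2 ^ (j*32) + 2 ^ (1024 + j) < 2 ^ 1056 := by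
      have ha : m * 2 ^ (j*32) < 2 ^ 1024 := by
        calc m * 2 ^ (j*32) < 4294967296 * 2 ^ (j*32) :=
              (Nat.mul_lt_mul_right (Nat.two_pow_pos _)).mpr hm32
          _ = 2 ^ (32 + j*32) := by rw [pow_add]; norm_num
          _ ≤ 2 ^ 1024 := Nat.pow_le_pow_right (by norm_num) (by omega)
      have hbpow : 2 ^ (1024 + j) ≤ 2 ^ 1055 := Nat.pow_le_pow_right (by norm_num) (by omega)
      have : (2:Nat) ^ 1024 + 2 ^ 1055 ≤ 2 ^ 1056 := by
        have h1024 : (2:Nat) ^ 1024 ≤ 2 ^ 1055 := Nat.pow_le_pow_right (by norm_num) (by norm_num)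
        calc (2:Nat) ^ 1024 + 2 ^ 1055 ≤ 2 ^ 1055 + 2 ^ 1055 := by omega
          _ = 2 ^ 1056 := by rw [← two_mul, ← pow_succ']
      omega
    have h2 := Nat.two_pow_add_eq_or_of_lt hp2 b
    have hA : m * 2 ^ (j*32) ||| 2 ^ (1024+j) = m * 2 ^ (j*32) + 2 ^ (1024+j) := by
      rw [Nat.lor_comm, ← h1, Nat.add_comm]
    have hB : (m * 2 ^ (j*32) + 2 ^ (1024+j)) ||| b * 2 ^ 1056
        = m * 2 ^ (j*32) + 2 ^ (1024+j) + b * 2 ^ 1056 := by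
      rw [Nat.mul_comm b (2 ^ 1056), Nat.lor_comm, ← h2]
      ring
    rw [hA, hB, Nat.mul_comm j 32, ← pow_add]
  rw [this]
  push_cast [Nat.shiftLeft_eq]
  ring

-- B's 32 accumulator steps produce the 32 closed-form rows
theorem pv_inner_B (TOP : Int) (n : Nat) (acc : List Int) (coef bsel t : Int) :
    ((List.range n).foldl (pvInnerB TOP) (acc, coef, bsel, t)).1
    = acc ++ (List.range n).map (fun (j : Nat) =>
        coef <<< (32 * j) + bsel <<< j + PySem.Int.mod (t >>> j) 2 * TOP) := by
  induction n generalizing acc coef bsel t with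
  | zero => simp
  | succ n ih =>
    rw [List.range_succ_eq_map, List.foldl_cons, List.foldl_map]
    have hfe : (fun (x : List Int × Int × Int × Int) (y : Nat) => pvInnerB TOP x y.succ)
        = pvInnerB TOP := by funext x y; rfl
    rw [hfe]
    show ((List.range n).foldl (pvInnerB TOP)
        (acc ++ [coef + bsel + PySem.Int.mod t 2 * TOP], coef <<< (32 : Nat), bsel <<< (1 : Nat),
          PySem.Int.floordiv t 2)).1 = _
    rw [ih]
    have hfd : PySem.Int.floordiv t 2 = t >>> (1 : Nat) := by
      rw [PySem.Int.floordiv_eq_ediv_of_pos (by norm_num), Int.shiftRight_eq_div_pow]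
      norm_num
    have hmap : ∀ j : Nat,
        (coef <<< (32 : Nat)) <<< (32 * j) + (bsel <<< (1 : Nat)) <<< j
            + PySem.Int.mod ((PySem.Int.floordiv t 2) >>> j) 2 * TOP
        = coef <<< (32 * j.succ) + bsel <<< j.succ + PySem.Int.mod (t >>> j.succ) 2 * TOP := by
      intro j
      rw [hfd, ← Int.shiftRight_add, ← Int.shiftLeft_add, ← Int.shiftLeft_add]
      have h1 : 32 + 32 * j = 32 * j.succ := by omega
      have h2 : 1 + j = j.succ := by omega
      rw [h1, h2]
    have h0 : coef <<< (32 * (0 : Nat)) + bsel <<< (0 : Nat) + PySem.Int.mod (t >>> (0 : Nat)) 2 * TOP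
        = coef + bsel + PySem.Int.mod t 2 * TOP := by
      simp [Int.shiftLeft_zero, Int.shiftRight_zero]
    rw [List.map_cons, List.map_map]
    simp only [Function.comp_def, List.append_assoc, List.cons_append, List.nil_append]
    rw [h0]
    exact congrArg _ (congrArg _ (List.map_congr_left fun j _ => hmap j))

-- B's outer fold over the tail, with the previous state tracked, is the flatMap over consecutive pairs
theorem pv_outer_B (TOP : Int) (l : List Int) (p : Int) (acc : List Int) :
    (l.foldl (pvOuterB TOP) (acc, some p)).1
    = acc ++ ((p :: l).zip l).flatMap (fun (q : Int × Int) => (List.range 32).map (fun (j : Nat) =>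
        (PySem.Int.band q.1 4294967295) <<< (32 * j) + ((1 : Int) <<< (1024 : Nat)) <<< j
          + PySem.Int.mod (q.2 >>> j) 2 * TOP)) := by
  induction l generalizing p acc with
  | nil => simp
  | cons s xs ih =>
    rw [List.foldl_cons]
    show (xs.foldl (pvOuterB TOP)
        (((List.range 32).foldl (pvInnerB TOP)
          (acc, PySem.Int.band p 4294967295, (1 : Int) <<< (1024 : Nat), s)).1, some s)).1 = _
    rw [ih, pv_inner_B]
    simp [List.flatMap_cons, List.append_assoc]

-- ===== VERDICT (by name: the statement is the Claim_ definition above) =====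
theorem build_system_spec : Claim_equal_build_system := by
  intro states _
  unfold Spec_build_system build_system build_system_alt
  simp only
  congr 1
  -- reduce B's side to the flatMap of closed-form rows
  have hB : ((states.foldl (pvOuterB ((1 : Int) <<< (32 * 32 + 32 : Nat))) ([], none)).1 : List Int)
      = (states.zip (states.drop 1)).flatMap (fun (q : Int × Int) => (List.range 32).map (fun (j : Nat) =>
          (PySem.Int.band q.1 4294967295) <<< (32 * j) + ((1 : Int) <<< (1024 : Nat)) <<< j
            + PySem.Int.mod (q.2 >>> j) 2 * ((1 : Int) <<< (32 * 32 + 32 : Nat)))) := by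
    cases states with
    | nil => simp
    | cons x xs =>
      rw [List.foldl_cons]
      show ((xs.foldl (pvOuterB _) ([], some x)).1 : List Int) = _
      rw [pv_outer_B]
      simp
  rw [hB]
  have hrow : ∀ (p : Int × Int) (j : Nat), j < 32 →
      (PySem.Int.bor
        (PySem.Int.bor
          ((List.range 32).foldl (fun row (k : Nat) =>
            if PySem.Int.band (p.1 >>> k) 1 ≠ 0 then PySem.Int.bor row ((1 : Int) <<< (j * 32 + k)) else row) 0)
          ((1 : Int) <<< (1024 + j)))
        ((PySem.Int.band (p.2 >>> j) 1) <<< ((32 * 32 + 32 : Nat))))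
      = (PySem.Int.band p.1 4294967295) <<< (32 * j) + ((1 : Int) <<< (1024 : Nat)) <<< j
          + PySem.Int.mod (p.2 >>> j) 2 * ((1 : Int) <<< (32 * 32 + 32 : Nat)) := by
    intro p j hj
    rw [pv_inner_loop p.1 (j * 32)]
    have h1056 : (32 * 32 + 32 : Nat) = 1056 := by norm_num
    rw [h1056]
    have := pv_row_eq p.1 p.2 j hj
    unfold pvRow at this
    exact this
  induction (states.zip (states.drop 1)) using List.reverseRecOn with
  | nil => simp
  | append_singleton ps p ih =>
    rw [List.foldl_append, List.flatMap_append, ih, List.foldl_cons, List.foldl_nil,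
        pv_foldl_append_map]
    simp only [List.flatMap_cons, List.flatMap_nil, List.append_nil]
    exact congrArg _ (List.map_congr_left fun j hj => hrow p j (List.mem_range.mp hj))
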